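-- pv_equiv track=rewrite | github.com/MLGShyGui/Coding_Projects | Coding Review  /Final_String_Review.py | unique_english_letters
-- ===== SOURCE A (Python) =====
-- letters = "ABCDEFGHIJKLMNOPQRSTUVWXYZabcdefghijklmnopqrstuvwxyz"
--
-- def unique_english_letters(word):
--   total = 0
--   temp = []
--   for i in word:
--     if i in letters and not i in temp:
--       temp.append(i)
--       total+=1
--   return total
-- ===== SOURCE B (Python) =====
-- letters = "ABCDEFGHIJKLMNOPQRSTUVWXYZabcdefghijklmnopqrstuvwxyz"
--
-- def unique_english_letters(word):
--   return sum(1 for c in letters if c in word)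
-- ===== Notes on version B (the rewrite author's own statement) =====
-- stated objective: idiomatic
-- what changed: Inverts the traversal: instead of scanning word while maintaining a dedup accumulator list, B iterates over the fixed 52-letter alphabet once and counts which letters occur in word.
import Mathlib
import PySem

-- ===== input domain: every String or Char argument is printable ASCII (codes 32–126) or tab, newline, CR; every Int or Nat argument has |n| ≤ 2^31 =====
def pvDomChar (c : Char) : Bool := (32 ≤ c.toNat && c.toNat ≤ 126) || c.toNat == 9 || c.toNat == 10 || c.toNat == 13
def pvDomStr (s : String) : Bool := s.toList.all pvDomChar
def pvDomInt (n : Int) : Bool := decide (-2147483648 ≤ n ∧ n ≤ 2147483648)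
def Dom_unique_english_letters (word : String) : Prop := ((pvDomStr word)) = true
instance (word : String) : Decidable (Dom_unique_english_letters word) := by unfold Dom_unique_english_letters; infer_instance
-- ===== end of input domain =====

-- B iterates over the fixed 52-letter alphabet and counts letters occurring in word,
-- instead of A's scan of word with a dedup accumulator list (objective: idiomatic).

-- ===== PORT A =====
def pvLetters : List Char := "ABCDEFGHIJKLMNOPQRSTUVWXYZabcdefghijklmnopqrstuvwxyz".toList

def uelStep (st : Int × List Char) (i : Char) : Int × List Char :=
  if pvLetters.contains i && !st.2.contains i then (st.1 + 1, st.2 ++ [i]) else st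

def unique_english_letters (word : String) : Int :=
  (word.toList.foldl uelStep (0, [])).1

-- ===== PORT B =====
def unique_english_letters_alt (word : String) : Int :=
  pvLetters.foldl (fun acc c => if word.toList.contains c then acc + 1 else acc) 0

-- ===== PRECONDITION & SPEC =====
def Spec_unique_english_letters (word : String) (out : Int) : Prop := out = unique_english_letters_alt word
instance (word : String) (out : Int) : Decidable (Spec_unique_english_letters word out) := by unfold Spec_unique_english_letters; infer_instance

-- ===== CLAIM (what is proved, stated in full; the proofs are below) =====
def Claim_equal_unique_english_letters : Prop := ∀ (word : String), Dom_unique_english_letters word → Spec_unique_english_letters word (unique_english_letters word)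

-- ===== LEMMAS AND PROOFS =====

-- A's fold invariant: the counter tracks the growth of the dedup list, the list stays
-- nodup, and its members are exactly the old members plus the letters seen.
theorem uel_fold_inv (l : List Char) (t : Int) (temp : List Char) (hnd : temp.Nodup) :
    (l.foldl uelStep (t, temp)).1 = t + ((l.foldl uelStep (t, temp)).2.length - temp.length : Int)
    ∧ (l.foldl uelStep (t, temp)).2.Nodup
    ∧ ∀ c, c ∈ (l.foldl uelStep (t, temp)).2 ↔ (c ∈ temp ∨ (c ∈ l ∧ c ∈ pvLetters)) := by
  induction l generalizing t temp with
  | nil => simp [hnd]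
  | cons a l ih =>
    simp only [List.foldl_cons, uelStep]
    by_cases h : pvLetters.contains a && !temp.contains a
    · simp only [h, if_pos]
      simp only [Bool.and_eq_true, Bool.not_eq_eq_eq_not, Bool.not_true,
        List.contains_eq_mem, decide_eq_true_eq, decide_eq_false_iff_not] at h
      have hnd' : (temp ++ [a]).Nodup := by
        rw [List.nodup_append]
        refine ⟨hnd, List.nodup_singleton a, ?_⟩
        intro x hx y hy
        simp only [List.mem_singleton] at hy
        subst hy
        exact fun he => h.2 (he ▸ hx)
      obtain ⟨h1, h2, h3⟩ := ih (t + 1) (temp ++ [a]) hnd'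
      refine ⟨by rw [h1]; simp; ring, h2, ?_⟩
      intro c
      rw [h3 c]
      simp only [List.mem_append, List.mem_cons, List.not_mem_nil, or_false]
      constructor
      · rintro ((hc | rfl) | ⟨hc, hl⟩)
        · exact Or.inl hc
        · exact Or.inr ⟨Or.inl rfl, h.1⟩
        · exact Or.inr ⟨Or.inr hc, hl⟩
      · rintro (hc | ⟨(rfl | hc), hl⟩)
        · exact Or.inl (Or.inl hc)
        · exact Or.inl (Or.inr rfl)
        · exact Or.inr ⟨hc, hl⟩
    · simp only [h, if_neg, Bool.false_eq_true, not_false_iff]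
      simp only [Bool.and_eq_true, Bool.not_eq_eq_eq_not, Bool.not_true, not_and,
        List.contains_eq_mem, decide_eq_true_eq, decide_eq_false_iff_not, not_not] at h
      obtain ⟨h1, h2, h3⟩ := ih t temp hnd
      refine ⟨h1, h2, ?_⟩
      intro c
      rw [h3 c]
      simp only [List.mem_cons]
      constructor
      · rintro (hc | hc)
        · exact Or.inl hc
        · exact Or.inr ⟨Or.inr hc.1, hc.2⟩
      · rintro (hc | ⟨(rfl | hc), hl⟩)
        · exact Or.inl hc
        · exact Or.inl (h hl)
        · exact Or.inr ⟨hc, hl⟩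

-- B's fold counts the alphabet letters that pass the membership test.
theorem uel_count_fold (l : List Char) (w : List Char) (acc : Int) :
    l.foldl (fun acc c => if w.contains c then acc + 1 else acc) acc
      = acc + ((l.filter (fun c => w.contains c)).length : Int) := by
  induction l generalizing acc with
  | nil => simp
  | cons a l ih =>
    simp only [List.contains_eq_mem, decide_eq_true_eq] at ih
    simp only [List.foldl_cons, List.filter_cons, List.contains_eq_mem, decide_eq_true_eq]
    by_cases h : a ∈ w
    · simp only [h, decide_true, if_true, List.length_cons, ih]
      push_cast; ring
    · simp only [h, decide_false, if_false, ih]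

theorem pvLetters_nodup : pvLetters.Nodup := by decide

theorem unique_english_letters_spec : Claim_equal_unique_english_letters := by
  intro word _
  unfold Spec_unique_english_letters unique_english_letters unique_english_letters_alt
  obtain ⟨h1, h2, h3⟩ := uel_fold_inv word.toList 0 [] List.nodup_nil
  rw [h1, uel_count_fold]
  have hndB : (pvLetters.filter (fun c => word.toList.contains c)).Nodup :=
    pvLetters_nodup.filter _
  have hperm : (word.toList.foldl uelStep (0, [])).2.Perm
      (pvLetters.filter (fun c => word.toList.contains c)) := by
    apply List.perm_of_nodup_nodup_toFinset_eq h2 hndB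
    ext c
    simp only [List.mem_toFinset, h3 c, List.mem_filter, List.contains_iff_mem]
    tauto
  have hlen := hperm.length_eq
  simp only [List.contains_iff_mem] at hlen
  simp only [List.length_nil]
  omega

-- ===== VERDICT (by name: the statement is the Claim_ definition above) =====
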